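-- pv_equiv track=rewrite | github.com/drmisssciurus/bp-tr | Lesson11_slices/hw_test.py | is_lucky_number_sides
-- ===== SOURCE A (Python) =====
-- def is_lucky_number_sides(number:int)->str:
-- 	i = count(number)
-- 	if i % 2 != 0:
-- 		error = 'error: number should have equal number of numbers for both sides'
-- 		return error
-- 	sum_ = 0
-- 	while i > 0:
-- 		sum_ += (number//10**(i-1)) - number%10
-- 		number -= (number//10**(i-1))*10**(i-1)
-- 		number //= 10
-- 		i-=2
-- 	return 'luck' if sum_ == 0 else 'not luck'
--
-- def count(number):
-- 	count=0
-- 	while number != 0: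
-- 		count += 1
-- 		number = number// 10
-- 	return count
-- ===== SOURCE B (Python) =====
-- def is_lucky_number_sides(number: int) -> str:
--     digits = []
--     n = number
--     while n != 0:
--         digits.append(n % 10)
--         n //= 10
--     if len(digits) % 2 != 0:
--         return 'error: number should have equal number of numbers for both sides'
--     total = 0
--     for k in range(len(digits) // 2):
--         total += digits[len(digits) - 1 - k] - digits[k]
--     return 'luck' if total == 0 else 'not luck'
-- ===== Notes on version B (the rewrite author's own statement) =====
-- stated objective: simpler
-- what changed: B extracts all digits once into a list with the modulo loop and then sums front-minus-back differences over symmetric indices in one pass, instead of A's loop that repeatedly recomputes 10**(i-1) to peel the leading digit and rewrite the number each iteration.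
import Mathlib
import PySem

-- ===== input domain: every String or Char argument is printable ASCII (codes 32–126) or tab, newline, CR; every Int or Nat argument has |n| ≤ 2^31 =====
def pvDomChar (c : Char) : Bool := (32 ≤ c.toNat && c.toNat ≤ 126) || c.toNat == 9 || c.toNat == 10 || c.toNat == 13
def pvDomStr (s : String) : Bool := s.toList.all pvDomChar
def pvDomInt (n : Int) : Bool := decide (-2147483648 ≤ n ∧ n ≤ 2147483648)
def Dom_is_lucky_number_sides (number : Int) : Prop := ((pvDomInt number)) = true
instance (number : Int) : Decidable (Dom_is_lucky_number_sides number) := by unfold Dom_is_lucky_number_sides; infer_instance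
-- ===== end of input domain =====

-- B builds the digit list once and sums front-minus-back differences over symmetric
-- indices in one pass, instead of A's repeated power-of-ten peeling (objective: simpler).


-- ===== PORT A =====
-- count's 'while number != 0: number //= 10' loop; the Nat recursion on number.toNat is
-- exact for number ≥ 0; on negative input the Python loop never terminates (outside Pre_).
def pvCountAux (n : Nat) : Nat :=
  if n = 0 then 0 else pvCountAux (n / 10) + 1
decreasing_by exact Nat.div_lt_self (Nat.pos_of_ne_zero (by assumption)) (by omega)

def pvCount (number : Int) : Nat := pvCountAux number.toNat

-- A's 'while i > 0' loop over the state (sum_, number, i)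
def pvLoopA (sum_ : Int) (number : Int) (i : Nat) : Int :=
  if i > 0 then
    pvLoopA (sum_ + (PySem.Int.floordiv number (10 ^ (i - 1)) - PySem.Int.mod number 10))
      (PySem.Int.floordiv (number - PySem.Int.floordiv number (10 ^ (i - 1)) * 10 ^ (i - 1)) 10)
      (i - 2)
  else sum_
decreasing_by omega

def is_lucky_number_sides (number : Int) : String :=
  let i := pvCount number
  if i % 2 ≠ 0 then "error: number should have equal number of numbers for both sides"
  else if pvLoopA 0 number i = 0 then "luck" else "not luck"

-- ===== PORT B =====
-- B's 'while n != 0: digits.append(n % 10); n //= 10' loop; the Nat recursion on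
-- number.toNat is exact for number ≥ 0; on negative input B's Python loop never
-- terminates (outside Pre_).
def pvDigitsAux (n : Nat) : List Int :=
  if n = 0 then [] else ((n % 10 : Nat) : Int) :: pvDigitsAux (n / 10)
decreasing_by exact Nat.div_lt_self (Nat.pos_of_ne_zero (by assumption)) (by omega)

def is_lucky_number_sides_alt (number : Int) : String :=
  let digits := pvDigitsAux number.toNat
  if digits.length % 2 ≠ 0 then "error: number should have equal number of numbers for both sides"
  else
    let total := (List.range (digits.length / 2)).foldl
      (fun t k => t + (digits.getD (digits.length - 1 - k) 0 - digits.getD k 0)) 0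
    if total = 0 then "luck" else "not luck"

-- ===== PRECONDITION & SPEC =====
-- Pre_ excludes negative numbers: there both Pythons' 'n //= 10' loops never reach 0
-- (Python floor division keeps negatives at -1), so A never returns a value.
def Pre_is_lucky_number_sides (number : Int) : Prop := 0 ≤ number
instance (number : Int) : Decidable (Pre_is_lucky_number_sides number) := by
  unfold Pre_is_lucky_number_sides; infer_instance

def pvWitness_is_lucky_number_sides : Int := 1221

def Spec_is_lucky_number_sides (number : Int) (out : String) : Prop := out = is_lucky_number_sides_alt number
instance (number : Int) (out : String) : Decidable (Spec_is_lucky_number_sides number out) := by unfold Spec_is_lucky_number_sides; infer_instance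

-- ===== CLAIM (what is proved, stated in full; the proofs are below) =====
def Claim_equal_is_lucky_number_sides : Prop := ∀ (number : Int), Dom_is_lucky_number_sides number → Pre_is_lucky_number_sides number → Spec_is_lucky_number_sides number (is_lucky_number_sides number)

-- ===== LEMMAS AND PROOFS =====

-- value of a least-significant-first digit list
def pvVal : List Int → Int
  | [] => 0
  | d :: D => d + 10 * pvVal D

-- B's symmetric-pair total, as a function of the digit list
def pvTotalB (D : List Int) : Int :=
  (List.range (D.length / 2)).foldl
    (fun t k => t + (D.getD (D.length - 1 - k) 0 - D.getD k 0)) 0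

theorem pvVal_digitsAux (n : Nat) : pvVal (pvDigitsAux n) = (n : Int) := by
  induction n using Nat.strong_induction_on with
  | _ n ih =>
    rw [pvDigitsAux]
    by_cases h : n = 0
    · simp [h, pvVal]
    · simp only [h, if_false, pvVal]
      rw [ih (n / 10) (Nat.div_lt_self (Nat.pos_of_ne_zero h) (by omega))]
      push_cast
      omega

theorem pvCountAux_length (n : Nat) : pvCountAux n = (pvDigitsAux n).length := by
  induction n using Nat.strong_induction_on with
  | _ n ih =>
    rw [pvCountAux, pvDigitsAux]
    by_cases h : n = 0
    · simp [h]
    · simp only [h, if_false, List.length_cons]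
      rw [ih (n / 10) (Nat.div_lt_self (Nat.pos_of_ne_zero h) (by omega))]

theorem pvDigitsAux_bounds (n : Nat) : ∀ d ∈ pvDigitsAux n, 0 ≤ d ∧ d < 10 := by
  induction n using Nat.strong_induction_on with
  | _ n ih =>
    rw [pvDigitsAux]
    by_cases h : n = 0
    · simp [h]
    · simp only [h, if_false, List.mem_cons]
      rintro d (rfl | hd)
      · constructor <;> [positivity; exact_mod_cast Nat.mod_lt n (by omega)]
      · exact ih (n / 10) (Nat.div_lt_self (Nat.pos_of_ne_zero h) (by omega)) d hd

theorem pvVal_nonneg (D : List Int) (hb : ∀ d ∈ D, 0 ≤ d ∧ d < 10) : 0 ≤ pvVal D := by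
  induction D with
  | nil => simp [pvVal]
  | cons d D ih =>
    simp only [pvVal]
    have h1 := hb d (List.mem_cons_self)
    have h2 := ih (fun x hx => hb x (List.mem_cons_of_mem _ hx))
    omega

theorem pvVal_lt (D : List Int) (hb : ∀ d ∈ D, 0 ≤ d ∧ d < 10) :
    pvVal D < 10 ^ D.length := by
  induction D with
  | nil => simp [pvVal]
  | cons d D ih =>
    simp only [pvVal, List.length_cons, pow_succ]
    have h1 := hb d (List.mem_cons_self)
    have h2 := ih (fun x hx => hb x (List.mem_cons_of_mem _ hx))
    nlinarith

theorem pvVal_append_single (D : List Int) (e : Int) :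
    pvVal (D ++ [e]) = pvVal D + e * 10 ^ D.length := by
  induction D with
  | nil => simp [pvVal]
  | cons d D ih => simp [pvVal, ih, pow_succ]; ring

-- B's total over d :: mid ++ [e] peels the outer pair
theorem pvTotalB_cons_append (d e : Int) (mid : List Int) :
    pvTotalB (d :: (mid ++ [e])) = (e - d) + pvTotalB mid := by
  unfold pvTotalB
  have hlen : (d :: (mid ++ [e])).length = mid.length + 2 := by simp
  rw [hlen]
  have hK : (mid.length + 2) / 2 = mid.length / 2 + 1 := by omega
  rw [hK]
  rw [PySem.List.foldl_add, PySem.List.foldl_add]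
  rw [List.range_succ_eq_map]
  simp only [List.map_cons, List.map_map, List.sum_cons]
  have h0 : (d :: (mid ++ [e])).getD (mid.length + 2 - 1 - 0) 0 = e := by
    have : mid.length + 2 - 1 - 0 = mid.length + 1 := by omega
    rw [this]
    rw [List.getD_cons_succ, List.getD_eq_getElem?_getD,
      List.getElem?_append_right (Nat.le_refl _)]
    simp
  have h0' : (d :: (mid ++ [e])).getD 0 0 = d := by simp [List.getD]
  have hmap : ∀ k ∈ List.range (mid.length / 2),
      ((fun k => (d :: (mid ++ [e])).getD (mid.length + 2 - 1 - k) 0 -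
        (d :: (mid ++ [e])).getD k 0) ∘ (fun k => k + 1)) k =
      (fun k => mid.getD (mid.length - 1 - k) 0 - mid.getD k 0) k := by
    intro k hk
    rw [List.mem_range] at hk
    have hk2 : k < mid.length := by omega
    simp only [Function.comp_apply]
    have hi1 : mid.length + 2 - 1 - (k + 1) = mid.length - k := by omega
    rw [hi1]
    have ha : (d :: (mid ++ [e])).getD (mid.length - k) 0 = mid.getD (mid.length - 1 - k) 0 := by
      have hidx : mid.length - k = (mid.length - 1 - k) + 1 := by omega
      rw [hidx, List.getD_cons_succ]
      rw [List.getD_eq_getElem?_getD, List.getElem?_append_left (by omega),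
        ← List.getD_eq_getElem?_getD]
    have hb2 : (d :: (mid ++ [e])).getD (k + 1) 0 = mid.getD k 0 := by
      rw [List.getD_cons_succ]
      rw [List.getD_eq_getElem?_getD, List.getElem?_append_left hk2,
        ← List.getD_eq_getElem?_getD]
    rw [ha, hb2]
  rw [List.map_congr_left hmap]
  rw [h0, h0']
  ring

-- main invariant: A's loop on (s, value of D, length of D) computes s + B's total of D
theorem pvLoopA_eq (m : Nat) : ∀ (D : List Int), D.length = m →
    (∀ d ∈ D, 0 ≤ d ∧ d < 10) → D.length % 2 = 0 →
    ∀ s : Int, pvLoopA s (pvVal D) D.length = s + pvTotalB D := by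
  induction m using Nat.strong_induction_on with
  | _ m ih =>
    intro D hlen hb hpar s
    match D with
    | [] => simp [pvLoopA, pvTotalB, pvVal]
    | [d] => simp at hpar
    | d :: D' =>
      have hne : D' ≠ [] := by
        intro h; subst h; simp at hpar
      rcases List.eq_nil_or_concat D' with rfl | ⟨mid, e, rfl⟩
      · exact absurd rfl hne
      simp only [List.concat_eq_append] at hb hpar ⊢
      have hbd := hb d (List.mem_cons_self)
      have hbe : 0 ≤ e ∧ e < 10 := hb e (by simp)
      have hbmid : ∀ x ∈ mid, 0 ≤ x ∧ x < 10 := fun x hx => hb x (by simp [hx])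
      have hL : (d :: (mid ++ [e])).length = mid.length + 2 := by simp
      have hmidnn : 0 ≤ pvVal mid := pvVal_nonneg mid hbmid
      have hmidlt : pvVal mid < 10 ^ mid.length := pvVal_lt mid hbmid
      have hval : pvVal (d :: (mid ++ [e])) = d + 10 * pvVal mid + e * 10 ^ (mid.length + 1) := by
        simp [pvVal, pvVal_append_single]; ring
      rw [hL, pvLoopA]
      simp only [Nat.zero_lt_succ, if_pos, Nat.add_sub_cancel]
      have hpow : (0:Int) < 10 ^ (mid.length + 1) := by positivity
      have hbody : d + 10 * pvVal mid < 10 ^ (mid.length + 1) := by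
        rw [pow_succ]; nlinarith
      have hfd : PySem.Int.floordiv (pvVal (d :: (mid ++ [e]))) (10 ^ (mid.length + 1)) = e := by
        rw [PySem.Int.floordiv_eq_iff_of_pos hpow, hval]
        constructor <;> nlinarith
      have hmod : PySem.Int.mod (pvVal (d :: (mid ++ [e]))) 10 = d := by
        rw [PySem.Int.mod_eq_emod_of_pos (by omega), hval]
        have : d + 10 * pvVal mid + e * 10 ^ (mid.length + 1)
            = d + 10 * (pvVal mid + e * 10 ^ mid.length) := by rw [pow_succ]; ring
        rw [this, Int.add_mul_emod_self_left, Int.emod_eq_of_lt hbd.1 hbd.2]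
      have hstrip : PySem.Int.floordiv
          (pvVal (d :: (mid ++ [e])) - e * 10 ^ (mid.length + 1)) 10
          = pvVal mid := by
        rw [PySem.Int.floordiv_eq_iff_of_pos (by omega : (0:Int) < 10), hval]
        constructor <;> nlinarith
      have h21 : mid.length + 2 - 1 = mid.length + 1 := by omega
      rw [h21, hfd, hmod, hstrip]
      have hm : mid.length < m := by simp at hlen; omega
      have := ih mid.length hm mid rfl hbmid (by omega) (s + (e - d))
      rw [this, pvTotalB_cons_append]
      ring

-- ===== VERDICT (by name: the statement is the Claim_ definition above) =====
theorem is_lucky_number_sides_spec : Claim_equal_is_lucky_number_sides := by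
  intro number _ hpre
  unfold Spec_is_lucky_number_sides
  unfold is_lucky_number_sides is_lucky_number_sides_alt
  simp only [pvCount, pvCountAux_length]
  set D := pvDigitsAux number.toNat with hD
  have hval : pvVal D = number := by
    rw [hD, pvVal_digitsAux, Int.toNat_of_nonneg hpre]
  by_cases hpar : D.length % 2 ≠ 0
  · simp [hpar]
  · rw [Classical.not_not] at hpar
    simp only [hpar, ne_eq, not_true_eq_false, if_false]
    rw [← hval, pvLoopA_eq D.length D rfl (pvDigitsAux_bounds _) hpar 0]
    rw [zero_add]
    rfl
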